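-- pv_equiv track=rewrite | github.com/sancho-mgn/sports_programming | Football.py | Sort_One_Pemutation
-- ===== SOURCE A (Python) =====
-- def Sort_One_Pemutation(lst, len_lst):
--     lst_sort = sorted(lst)
--     for i in range(len_lst):
--         for j in range(i + 1, len_lst):
--             lst[i], lst[j] = lst[j], lst[i]
--             if lst == lst_sort:
--                 return True
--             else:
--                 lst[i], lst[j] = lst[j], lst[i]
--     return False
-- ===== SOURCE B (Python) =====
-- def Sort_One_Pemutation(lst, len_lst):
--     s = sorted(lst)
--     diff = [k for k in range(len(lst)) if lst[k] != s[k]]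
--     if not diff:
--         # already sorted: a swap keeps it sorted iff it swaps two equal
--         # elements inside the first len_lst positions
--         return any(lst[k] == lst[k + 1] and k + 1 < len_lst
--                    for k in range(len(lst) - 1))
--     if len(diff) == 2:
--         i, j = diff
--         return j < len_lst and lst[i] == s[j] and lst[j] == s[i]
--     return False
-- ===== Notes on version B (the rewrite author's own statement) =====
-- stated objective: faster
-- what changed: Instead of trying every i<j swap and comparing the whole list to sorted(lst) (O(n^3)), B compares lst to sorted(lst) once, collects mismatch positions, and decides from 0/2 mismatches (with an adjacent-duplicate scan for the already-sorted case).
-- outside the precondition, e.g. on Sort_One_Pemutation([2, 1], 5): A returns True, B returns True; on Sort_One_Pemutation([1, 2], 3): A raises IndexError, B returns False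
import Mathlib
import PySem

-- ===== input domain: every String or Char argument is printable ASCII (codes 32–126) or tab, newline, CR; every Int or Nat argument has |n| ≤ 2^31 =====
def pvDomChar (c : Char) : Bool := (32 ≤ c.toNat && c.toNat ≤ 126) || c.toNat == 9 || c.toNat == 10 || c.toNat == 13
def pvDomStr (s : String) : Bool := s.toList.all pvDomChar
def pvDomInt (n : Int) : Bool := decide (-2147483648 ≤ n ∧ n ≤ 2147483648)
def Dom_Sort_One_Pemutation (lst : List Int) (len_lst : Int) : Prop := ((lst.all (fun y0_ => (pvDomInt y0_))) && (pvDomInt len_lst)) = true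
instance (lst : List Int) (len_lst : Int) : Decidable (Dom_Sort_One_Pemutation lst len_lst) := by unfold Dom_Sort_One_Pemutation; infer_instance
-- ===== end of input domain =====

-- B replaces A's try-every-swap-and-compare search with one comparison of lst
-- against sorted(lst) and a case split on the mismatch positions (objective:
-- faster). Equivalence is about the RETURN value only: A mutates lst in place
-- (when it returns True, lst is left with the successful swap applied); B does
-- not mutate its argument.

-- ===== PORT A =====
-- the simultaneous assignment lst[i], lst[j] = lst[j], lst[i]; the else-branch
-- swap restores lst, so each loop step only compares this swapped list with
-- lst_sort and leaves lst as it was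
def pvSwap (lst : List Int) (i j : Int) : List Int :=
  match PySem.List.pyGet? lst i, PySem.List.pyGet? lst j with
  | some a, some b => PySem.List.pySetD (PySem.List.pySetD lst i b) j a
  | _, _ => lst

def Sort_One_Pemutation (lst : List Int) (len_lst : Int) : Bool :=
  let lst_sort := PySem.List.sorted lst (fun x => x) false
  (PySem.List.pyRange 0 len_lst 1).any (fun i =>
    (PySem.List.pyRange (i + 1) len_lst 1).any (fun j =>
      pvSwap lst i j == lst_sort))

-- ===== PORT B =====
def pvSorted (lst : List Int) : List Int := PySem.List.sorted lst (fun x => x) false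

def pvDiff (lst : List Int) : List Nat :=
  (List.range lst.length).filter (fun k => !(lst.getD k 0 == (pvSorted lst).getD k 0))

def Sort_One_Pemutation_alt (lst : List Int) (len_lst : Int) : Bool :=
  match pvDiff lst with
  | [] =>
      (List.range (lst.length - 1)).any (fun k =>
        (lst.getD k 0 == lst.getD (k + 1) 0) && decide ((k : Int) + 1 < len_lst))
  | [i, j] =>
      decide ((j : Int) < len_lst) && (lst.getD i 0 == (pvSorted lst).getD j 0)
        && (lst.getD j 0 == (pvSorted lst).getD i 0)
  | _ => false


-- ===== PRECONDITION & SPEC =====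
-- Pre_ excludes len_lst > len(lst): there A's inner loop indexes past the end of
-- lst and in general raises IndexError (on a few such inputs A still returns True
-- first, when an early swap inside the list already yields the sorted list — see
-- the cites in claim.json).
def Pre_Sort_One_Pemutation (lst : List Int) (len_lst : Int) : Prop :=
  len_lst ≤ (lst.length : Int)
instance (lst : List Int) (len_lst : Int) : Decidable (Pre_Sort_One_Pemutation lst len_lst) := by unfold Pre_Sort_One_Pemutation; infer_instance

def pvWitness_Sort_One_Pemutation : List Int × Int := ([2, 1], 2)

def Spec_Sort_One_Pemutation (lst : List Int) (len_lst : Int) (out : Bool) : Prop := out = Sort_One_Pemutation_alt lst len_lst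
instance (lst : List Int) (len_lst : Int) (out : Bool) : Decidable (Spec_Sort_One_Pemutation lst len_lst out) := by unfold Spec_Sort_One_Pemutation; infer_instance

-- ===== CLAIM (what is proved, stated in full; the proofs are below) =====
def Claim_equal_Sort_One_Pemutation : Prop := ∀ (lst : List Int) (len_lst : Int), Dom_Sort_One_Pemutation lst len_lst → Pre_Sort_One_Pemutation lst len_lst → Spec_Sort_One_Pemutation lst len_lst (Sort_One_Pemutation lst len_lst)

-- ===== LEMMAS AND PROOFS =====

lemma pvSwap_natCast (lst : List Int) (p q : Nat) (hp : p < lst.length) (hq : q < lst.length) :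
    pvSwap lst (p : Int) (q : Int) = (lst.set p (lst.getD q 0)).set q (lst.getD p 0) := by
  simp [pvSwap, hp, hq, List.getD_eq_getElem]

lemma A_true_iff_nat (lst : List Int) (L : Int) (hpre : L ≤ (lst.length : Int)) :
    Sort_One_Pemutation lst L = true ↔
      ∃ p q : Nat, p < q ∧ (q : Int) < L ∧ q < lst.length ∧
        (lst.set p (lst.getD q 0)).set q (lst.getD p 0) = pvSorted lst := by
  simp only [Sort_One_Pemutation, pvSorted, List.any_eq_true, PySem.List.mem_pyRange_one,
    beq_iff_eq]
  constructor
  · rintro ⟨i, ⟨hi0, hiL⟩, j, ⟨hij, hjL⟩, h⟩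
    refine ⟨i.toNat, j.toNat, by omega, by omega, by omega, ?_⟩
    rw [← pvSwap_natCast lst i.toNat j.toNat (by omega) (by omega)]
    simpa [Int.toNat_of_nonneg, hi0, show (0:Int) ≤ j by omega] using h
  · rintro ⟨p, q, hpq, hqL, hqn, h⟩
    refine ⟨(p : Int), ⟨by omega, by omega⟩, (q : Int), ⟨by omega, hqL⟩, ?_⟩
    rw [pvSwap_natCast lst p q (by omega) hqn]
    exact h

lemma mem_pvDiff_iff (lst : List Int) (k : Nat) :
    k ∈ pvDiff lst ↔ lst[k]? ≠ (pvSorted lst)[k]? := by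
  have hsl : (pvSorted lst).length = lst.length := PySem.List.length_sorted lst _ _
  simp only [pvDiff, List.mem_filter, List.mem_range, Bool.not_eq_eq_eq_not, Bool.not_true,
    beq_eq_false_iff_ne, ne_eq]
  constructor
  · rintro ⟨hk, hne⟩
    rw [List.getElem?_eq_getElem hk, List.getElem?_eq_getElem (by omega)]
    simp only [Option.some.injEq]
    rwa [List.getD_eq_getElem lst 0 hk, List.getD_eq_getElem (pvSorted lst) 0 (by omega)] at hne
  · intro hne
    by_cases hk : k < lst.length
    · refine ⟨hk, ?_⟩
      rw [List.getD_eq_getElem lst 0 hk, List.getD_eq_getElem (pvSorted lst) 0 (by omega)]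
      intro h
      apply hne
      rw [List.getElem?_eq_getElem hk, List.getElem?_eq_getElem (by omega), h]
    · exfalso; apply hne
      rw [List.getElem?_eq_none (by omega), List.getElem?_eq_none (by omega)]

lemma pv_swap_eq_iff (lst s : List Int)
    (p q : Nat) (hp : p < lst.length) (hq : q < lst.length) (hne : p ≠ q) :
    ((lst.set p (lst.getD q 0)).set q (lst.getD p 0) = s) ↔
      ((∀ k, k ≠ p → k ≠ q → lst[k]? = s[k]?) ∧ s[p]? = lst[q]? ∧ s[q]? = lst[p]?) := by
  have hgp : lst.getD p 0 = lst[p] := List.getD_eq_getElem lst 0 hp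
  have hgq : lst.getD q 0 = lst[q] := List.getD_eq_getElem lst 0 hq
  rw [hgp, hgq]
  constructor
  · intro h
    refine ⟨?_, ?_, ?_⟩
    · intro k hkp hkq
      have := congrArg (fun l => l[k]?) h
      simpa [List.getElem?_set_ne (Ne.symm hkq), List.getElem?_set_ne (Ne.symm hkp)] using this
    · have := congrArg (fun l => l[p]?) h
      simp only [List.getElem?_set_ne (Ne.symm hne)] at this
      rw [List.getElem?_set_self (by simpa using hp)] at this
      rw [← this, List.getElem?_eq_getElem hq]
    · have := congrArg (fun l => l[q]?) h
      simp only [] at this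
      rw [List.getElem?_set_self (by simpa using hq)] at this
      rw [← this, List.getElem?_eq_getElem hp]
  · rintro ⟨hk, hsp, hsq⟩
    apply List.ext_getElem?
    intro k
    by_cases hkq : k = q
    · subst hkq
      rw [List.getElem?_set_self (by simpa using hq), hsq, List.getElem?_eq_getElem hp]
    · rw [List.getElem?_set_ne (fun h => hkq h.symm)]
      by_cases hkp : k = p
      · subst hkp
        rw [List.getElem?_set_self hp, hsp, List.getElem?_eq_getElem hq]
      · rw [List.getElem?_set_ne (fun h => hkp h.symm), hk k hkp hkq]

theorem pv_main (lst : List Int) (L : Int) (hpre : L ≤ (lst.length : Int)) :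
    Sort_One_Pemutation lst L = Sort_One_Pemutation_alt lst L := by
  rw [Bool.eq_iff_iff, A_true_iff_nat lst L hpre]
  unfold Sort_One_Pemutation_alt
  have hsl : (pvSorted lst).length = lst.length := PySem.List.length_sorted lst _ _
  have hmem : ∀ k : Nat, k ∈ pvDiff lst ↔ lst[k]? ≠ (pvSorted lst)[k]? := mem_pvDiff_iff lst
  have hmemlt : ∀ k : Nat, k ∈ pvDiff lst → k < lst.length := by
    intro k hk
    by_contra hge
    exact (hmem k).mp hk (by rw [List.getElem?_eq_none (by omega), List.getElem?_eq_none (by omega)])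
  have hsort : List.Pairwise (· < ·) (pvDiff lst) :=
    List.Pairwise.filter _ List.pairwise_lt_range
  rcases hDe : pvDiff lst with - | ⟨i, - | ⟨j, - | ⟨k, t⟩⟩⟩
  · -- diff = []: lst is already sorted, lst = pvSorted lst
    rw [hDe] at hmem hmemlt hsort
    have hls : lst = pvSorted lst := by
      apply List.ext_getElem?
      intro k
      by_contra hne
      exact absurd ((hmem k).mpr hne) (List.not_mem_nil)
    have hpw : List.Pairwise (· ≤ ·) lst := by
      have hsp : List.Pairwise (· ≤ ·) (pvSorted lst) := by
        simpa [pvSorted] using PySem.List.sorted_pairwise lst (fun x => x)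
      rwa [← hls] at hsp
    simp only [List.any_eq_true, List.mem_range, Bool.and_eq_true, beq_iff_eq,
      decide_eq_true_eq]
    constructor
    · rintro ⟨p, q, hpq, hqL, hqn, hswap⟩
      rw [← hls] at hswap
      obtain ⟨-, hpb, hqa⟩ :=
        (pv_swap_eq_iff lst lst p q (by omega) hqn (by omega)).mp hswap
      have hpn : p < lst.length := by omega
      have hval : lst[p] = lst[q] := by
        have h2 := hqa.symm.trans (List.getElem?_eq_getElem hqn)
        rw [List.getElem?_eq_getElem hpn] at h2
        exact Option.some.inj h2
      have h1 : lst[p] ≤ lst[p+1]'(by omega) :=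
        List.pairwise_iff_getElem.mp hpw p (p+1) hpn (by omega) (by omega)
      have h2 : lst[p+1]'(by omega) ≤ lst[q] := by
        rcases Nat.lt_or_ge (p+1) q with h | h
        · exact List.pairwise_iff_getElem.mp hpw (p+1) q (by omega) hqn h
        · have hq1 : p + 1 = q := by omega
          subst hq1; exact le_refl _
      refine ⟨p, by omega, ⟨?_, by omega⟩⟩
      rw [List.getD_eq_getElem lst 0 hpn, List.getD_eq_getElem lst 0 (by omega : p+1 < lst.length)]
      omega
    · rintro ⟨k, hk, hval, hkL⟩
      have hkn : k < lst.length := by omega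
      have hk1n : k + 1 < lst.length := by omega
      refine ⟨k, k+1, by omega, by exact_mod_cast hkL, hk1n, ?_⟩
      rw [← hls]
      apply (pv_swap_eq_iff lst lst k (k+1) hkn hk1n (by omega)).mpr
      rw [List.getD_eq_getElem lst 0 hkn, List.getD_eq_getElem lst 0 hk1n] at hval
      refine ⟨fun _ _ _ => rfl, ?_, ?_⟩ <;>
        rw [List.getElem?_eq_getElem hkn, List.getElem?_eq_getElem hk1n, hval]
  · -- diff = [i]: impossible to fix by one swap; both sides false
    rw [hDe] at hmem hmemlt
    simp only [Bool.false_eq_true, iff_false]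
    rintro ⟨p, q, hpq, hqL, hqn, hswap⟩
    obtain ⟨hout, hpb, hqa⟩ :=
      (pv_swap_eq_iff lst (pvSorted lst) p q (by omega) hqn (by omega)).mp hswap
    have hi : lst[i]? ≠ (pvSorted lst)[i]? := (hmem i).mp (by simp)
    have hothers : ∀ m : Nat, m ≠ i → lst[m]? = (pvSorted lst)[m]? := by
      intro m hm
      by_contra hne
      have := (hmem m).mpr hne
      simp at this; omega
    have hipq : i = p ∨ i = q := by
      by_contra hc
      push Not at hc
      exact hi (hout i hc.1 hc.2)
    rcases hipq with rfl | rfl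
    · have hq' : lst[q]? = (pvSorted lst)[q]? := hothers q (by omega)
      exact hi (hpb.trans (hq'.trans hqa)).symm
    · have hp' : lst[p]? = (pvSorted lst)[p]? := hothers p (by omega)
      exact hi ((hpb.symm.trans hp'.symm).trans hqa.symm).symm.symm
  · -- diff = [i, j]
    rw [hDe] at hmem hmemlt hsort
    have hij : i < j := (List.pairwise_cons.mp hsort).1 j (by simp)
    have hin : i < lst.length := hmemlt i (by simp)
    have hjn : j < lst.length := hmemlt j (by simp)
    have hi : lst[i]? ≠ (pvSorted lst)[i]? := (hmem i).mp (by simp)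
    have hj : lst[j]? ≠ (pvSorted lst)[j]? := (hmem j).mp (by simp)
    have hothers : ∀ m : Nat, m ≠ i → m ≠ j → lst[m]? = (pvSorted lst)[m]? := by
      intro m hm1 hm2
      by_contra hne
      have := (hmem m).mpr hne
      simp at this; omega
    simp only [Bool.and_eq_true, beq_iff_eq, decide_eq_true_eq]
    rw [List.getD_eq_getElem lst 0 hin, List.getD_eq_getElem lst 0 hjn,
      List.getD_eq_getElem (pvSorted lst) 0 (by omega : i < (pvSorted lst).length),
      List.getD_eq_getElem (pvSorted lst) 0 (by omega : j < (pvSorted lst).length)]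
    constructor
    · rintro ⟨p, q, hpq, hqL, hqn, hswap⟩
      obtain ⟨hout, hpb, hqa⟩ :=
        (pv_swap_eq_iff lst (pvSorted lst) p q (by omega) hqn (by omega)).mp hswap
      have hipq : i = p ∨ i = q := by
        by_contra hc; push Not at hc; exact hi (hout i hc.1 hc.2)
      have hjpq : j = p ∨ j = q := by
        by_contra hc; push Not at hc; exact hj (hout j hc.1 hc.2)
      have hip : i = p := by omega
      have hjq : j = q := by omega
      subst hip; subst hjq
      refine ⟨⟨by exact_mod_cast hqL, ?_⟩, ?_⟩
      · have h2 := hqa.trans (List.getElem?_eq_getElem hin)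
        rw [List.getElem?_eq_getElem (by omega : j < (pvSorted lst).length)] at h2
        exact (Option.some.inj h2).symm
      · have h2 := hpb.trans (List.getElem?_eq_getElem hqn)
        rw [List.getElem?_eq_getElem (by omega : i < (pvSorted lst).length)] at h2
        exact (Option.some.inj h2).symm
    · rintro ⟨⟨hjL, hvi⟩, hvj⟩
      refine ⟨i, j, hij, by exact_mod_cast hjL, hjn, ?_⟩
      apply (pv_swap_eq_iff lst (pvSorted lst) i j hin hjn (by omega)).mpr
      refine ⟨fun m hm1 hm2 => hothers m hm1 hm2, ?_, ?_⟩
      · rw [List.getElem?_eq_getElem (by omega : i < (pvSorted lst).length),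
          List.getElem?_eq_getElem hjn, hvj]
      · rw [List.getElem?_eq_getElem (by omega : j < (pvSorted lst).length),
          List.getElem?_eq_getElem hin, hvi]
  · -- diff has ≥ 3 elements: no single swap can fix ≥ 3 mismatches
    rw [hDe] at hmem hmemlt hsort
    simp only [Bool.false_eq_true, iff_false]
    rintro ⟨p, q, hpq, hqL, hqn, hswap⟩
    obtain ⟨hout, -, -⟩ :=
      (pv_swap_eq_iff lst (pvSorted lst) p q (by omega) hqn (by omega)).mp hswap
    have hijk : i < j ∧ j < k := by
      rw [List.pairwise_cons] at hsort
      have h2 := hsort.2; rw [List.pairwise_cons] at h2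
      exact ⟨hsort.1 j (by simp), h2.1 k (by simp)⟩
    have hpq3 : ∀ m : Nat, m ∈ i :: j :: k :: t → m = p ∨ m = q := by
      intro m hm
      by_contra hc; push Not at hc
      exact (hmem m).mp hm (hout m hc.1 hc.2)
    have h1 := hpq3 i (by simp)
    have h2 := hpq3 j (by simp)
    have h3 := hpq3 k (by simp)
    omega

-- ===== VERDICT (by name: the statement is the Claim_ definition above) =====
theorem Sort_One_Pemutation_spec : Claim_equal_Sort_One_Pemutation := by
  intro lst len_lst _ hpre
  exact pv_main lst len_lst hpre
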